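-- pv_equiv track=rewrite | github.com/Aniketsonii/Learning | Python/smallest_lexicographic_string.py | smallest_lexicographic_string
-- ===== SOURCE A (Python) =====
-- def smallest_lexicographic_string(S, N, A, M):
--     if N % 5 != 0:
--         return "EMPTY"
--
--     # Step 1: Count occurrences of each 5-bit pattern in S
--     pattern_count = {}
--     for i in range(0, N, 5):
--         bin_str = S[i:i+5]
--         if bin_str in pattern_count:
--             pattern_count[bin_str] += 1
--         else:
--             pattern_count[bin_str] = 1
--
--     # Step 2: Create a mapping from binary string to character
--     bin_to_char = {A[i]: chr(97 + i) for i in range(M)}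
--
--     # Step 3: Count how many times each character can be formed
--     char_count = {}
--
--     for bin_str, count in pattern_count.items():
--         if bin_str in bin_to_char:
--             char = bin_to_char[bin_str]
--             if char in char_count:
--                 char_count[char] += count
--             else:
--                 char_count[char] = count
--
--     # Step 4: Construct the smallest lexicographical string
--     result = []
--     for char in sorted(char_count.keys()):
--         result.append(char * char_count[char])
--
--     return ''.join(result) if result else "EMPTY"
-- ===== SOURCE B (Python) =====
-- def smallest_lexicographic_string(S, N, A, M):
--     if N % 5 != 0:
--         return "EMPTY"
--     bin_to_char = {A[i]: chr(97 + i) for i in range(M)}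
--     letters = []
--     for i in range(0, N, 5):
--         chunk = S[i:i+5]
--         if chunk in bin_to_char:
--             letters.append(bin_to_char[chunk])
--     letters.sort()
--     return ''.join(letters) if letters else "EMPTY"
-- ===== Notes on version B (the rewrite author's own statement) =====
-- stated objective: simpler
-- what changed: B drops both counting dicts: it maps each 5-char chunk through bin_to_char into one flat list of letters, sorts that multiset and joins it, instead of A's count-patterns, aggregate-per-char, then concatenate char*count over sorted distinct keys.
import Mathlib
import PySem

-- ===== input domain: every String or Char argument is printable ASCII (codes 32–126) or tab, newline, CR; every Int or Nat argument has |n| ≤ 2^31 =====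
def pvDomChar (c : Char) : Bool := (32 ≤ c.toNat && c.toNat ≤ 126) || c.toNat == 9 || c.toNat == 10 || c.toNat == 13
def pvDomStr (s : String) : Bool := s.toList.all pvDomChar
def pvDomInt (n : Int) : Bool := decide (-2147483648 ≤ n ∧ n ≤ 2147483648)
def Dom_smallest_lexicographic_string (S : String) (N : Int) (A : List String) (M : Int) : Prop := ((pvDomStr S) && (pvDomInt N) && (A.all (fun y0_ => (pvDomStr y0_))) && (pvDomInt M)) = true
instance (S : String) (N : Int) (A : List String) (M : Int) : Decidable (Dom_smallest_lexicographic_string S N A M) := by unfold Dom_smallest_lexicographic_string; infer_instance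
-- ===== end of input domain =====

-- B collects the mapped letter of every chunk into one flat list, sorts it and joins it,
-- instead of A's two counting dicts followed by char*count concatenation over sorted keys;
-- same return value, structurally simpler.

-- ===== PORT A =====
-- shared helper: the dict comprehension {A[i]: chr(97 + i) for i in range(M)}, which
-- appears verbatim in both Python sources.  A[i] is pyGet?; its 'none' case is Python's
-- IndexError, excluded by Pre_, so the "" default is unreachable under Pre_.
def pvBinToChar (A : List String) (M : Int) : PySem.Dict String Char :=
  (PySem.List.pyRange 0 M 1).foldl
    (fun d i => d.insert ((PySem.List.pyGet? A i).getD "") (Char.ofNat (97 + i).toNat))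
    PySem.Dict.empty

-- dict lookups d[k] below all sit under an 'if k in d' guard, so they are ported as
-- getD with an unreachable default ('a').
def smallest_lexicographic_string (S : String) (N : Int) (A : List String) (M : Int) : String :=
  if PySem.Int.mod N 5 ≠ 0 then "EMPTY" else
  -- Step 1: pattern_count
  let pattern_count : PySem.Dict String Int :=
    (PySem.List.pyRange 0 N 5).foldl
      (fun d i =>
        let bin_str := PySem.Str.slice S (some i) (some (i + 5))
        if d.contains bin_str then d.insert bin_str (d.getD bin_str 0 + 1)
        else d.insert bin_str 1)
      PySem.Dict.empty
  -- Step 2: bin_to_char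
  let bin_to_char := pvBinToChar A M
  -- Step 3: char_count
  let char_count : PySem.Dict Char Int :=
    pattern_count.items.foldl
      (fun d p =>
        if bin_to_char.contains p.1 then
          let c := bin_to_char.getD p.1 'a'
          if d.contains c then d.insert c (d.getD c 0 + p.2) else d.insert c p.2
        else d)
      PySem.Dict.empty
  -- Step 4: result pieces, then ''.join(result) if result else "EMPTY"
  let result : List (List Char) :=
    (PySem.List.sorted char_count.keys (fun x => x) false).foldl
      (fun acc c => acc ++ [List.replicate (char_count.getD c 0).toNat c]) []
  if result = [] then "EMPTY" else String.ofList result.flatten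

-- ===== PORT B =====
def smallest_lexicographic_string_alt (S : String) (N : Int) (A : List String) (M : Int) : String :=
  if PySem.Int.mod N 5 ≠ 0 then "EMPTY" else
  let bin_to_char := pvBinToChar A M
  let letters : List Char :=
    (PySem.List.pyRange 0 N 5).foldl
      (fun acc i =>
        let chunk := PySem.Str.slice S (some i) (some (i + 5))
        if bin_to_char.contains chunk then acc ++ [bin_to_char.getD chunk 'a'] else acc)
      []
  let lettersSorted := PySem.List.sorted letters (fun x => x) false
  if lettersSorted = [] then "EMPTY" else String.ofList lettersSorted

-- ===== PRECONDITION & SPEC =====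
-- Pre_ excludes exactly the inputs on which Python A raises: when N % 5 == 0 (otherwise
-- A returns "EMPTY" before the comprehension), A[i] for i in range(M) raises IndexError
-- iff M > len(A).
def Pre_smallest_lexicographic_string (S : String) (N : Int) (A : List String) (M : Int) : Prop :=
  PySem.Int.mod N 5 = 0 → M ≤ (A.length : Int)
instance (S : String) (N : Int) (A : List String) (M : Int) : Decidable (Pre_smallest_lexicographic_string S N A M) := by unfold Pre_smallest_lexicographic_string; infer_instance

def pvWitness_smallest_lexicographic_string : String × Int × List String × Int :=
  ("aaaaabbbbbaaaaa", 15, ["aaaaa", "bbbbb"], 2)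

def Spec_smallest_lexicographic_string (S : String) (N : Int) (A : List String) (M : Int) (out : String) : Prop := out = smallest_lexicographic_string_alt S N A M
instance (S : String) (N : Int) (A : List String) (M : Int) (out : String) : Decidable (Spec_smallest_lexicographic_string S N A M out) := by unfold Spec_smallest_lexicographic_string; infer_instance

-- ===== CLAIM (what is proved, stated in full; the proofs are below) =====
def Claim_equal_smallest_lexicographic_string : Prop := ∀ (S : String) (N : Int) (A : List String) (M : Int), Dom_smallest_lexicographic_string S N A M → Pre_smallest_lexicographic_string S N A M → Spec_smallest_lexicographic_string S N A M (smallest_lexicographic_string S N A M)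

-- ===== LEMMAS AND PROOFS =====

-- counting in a guarded map: ((xs.filter p).map g).count c = countP (p x && g x = c)
theorem pv_count_filter_map {α β : Type} [DecidableEq α] [DecidableEq β]
    (p : α → Bool) (g : α → β) (xs : List α) (c : β) :
    ((xs.filter p).map g).count c = xs.countP (fun x => p x && (g x == c)) := by
  induction xs with
  | nil => simp
  | cons x t ih =>
    simp only [List.filter_cons, List.countP_cons]
    by_cases hp : p x = true
    · by_cases hg : g x = c <;> simp [hp, hg, List.count_cons, ih]
    · simp [hp, ih]

-- getD of A's char_count aggregation loop.
theorem pv_charfold_getD (p : String → Bool) (g : String → Char) (ps : List (String × Int))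
    (d : PySem.Dict Char Int) (c : Char) :
    (ps.foldl
        (fun d q =>
          if p q.1 then
            if d.contains (g q.1) then d.insert (g q.1) (d.getD (g q.1) 0 + q.2)
            else d.insert (g q.1) q.2
          else d) d).getD c 0
      = d.getD c 0 + ((ps.filter (fun q => p q.1 && (g q.1 == c))).map (·.2)).sum := by
  induction ps generalizing d with
  | nil => simp
  | cons q t ih =>
    simp only [List.foldl_cons, List.filter_cons]
    by_cases hq : p q.1 = true
    · have hstep : ∀ (dd : PySem.Dict Char Int),
          ((if dd.contains (g q.1) then dd.insert (g q.1) (dd.getD (g q.1) 0 + q.2)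
            else dd.insert (g q.1) q.2) : PySem.Dict Char Int).getD c 0
            = if c = g q.1 then dd.getD (g q.1) 0 + q.2 else dd.getD c 0 := by
        intro dd
        by_cases hc : dd.contains (g q.1) = true
        · simp [hc, PySem.Dict.getD_insert]
        · simp only [Bool.not_eq_true] at hc
          simp [hc, PySem.Dict.getD_insert,
            PySem.Dict.getD_of_not_contains (d := dd) (k := g q.1) (d0 := (0:Int)) hc]
      by_cases hc : c = g q.1
      · subst hc
        rw [ih]
        simp [hq, hstep]
        ring
      · rw [ih]
        have : (g q.1 == c) = false := by simp [Ne.symm hc]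
        simp [hq, hstep, hc, this]
    · rw [ih]
      simp [hq]

-- keys of A's char_count aggregation loop: nodup, and membership.
theorem pv_charfold_keys_nodup (p : String → Bool) (g : String → Char)
    (ps : List (String × Int)) (d : PySem.Dict Char Int) (h : d.keys.Nodup) :
    (ps.foldl
        (fun d q =>
          if p q.1 then
            if d.contains (g q.1) then d.insert (g q.1) (d.getD (g q.1) 0 + q.2)
            else d.insert (g q.1) q.2
          else d) d).keys.Nodup := by
  induction ps generalizing d with
  | nil => exact h
  | cons q t ih =>
    simp only [List.foldl_cons]
    by_cases hq : p q.1 = true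
    · by_cases hc : d.contains (g q.1) = true <;>
        simp [hq, hc] <;> exact ih _ (PySem.Dict.nodup_keys_insert _ _ _ h)
    · simp only [hq, Bool.false_eq_true, if_false]
      exact ih d h

theorem pv_charfold_keys_mem (p : String → Bool) (g : String → Char)
    (ps : List (String × Int)) (d : PySem.Dict Char Int) (c : Char) :
    (c ∈ (ps.foldl
        (fun d q =>
          if p q.1 then
            if d.contains (g q.1) then d.insert (g q.1) (d.getD (g q.1) 0 + q.2)
            else d.insert (g q.1) q.2
          else d) d).keys)
      ↔ (c ∈ d.keys ∨ ∃ q ∈ ps, p q.1 ∧ g q.1 = c) := by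
  induction ps generalizing d with
  | nil => simp
  | cons q t ih =>
    simp only [List.foldl_cons]
    by_cases hq : p q.1 = true
    · have hkeys : ∀ (dd : PySem.Dict Char Int),
          (c ∈ ((if dd.contains (g q.1) then dd.insert (g q.1) (dd.getD (g q.1) 0 + q.2)
            else dd.insert (g q.1) q.2) : PySem.Dict Char Int).keys)
            ↔ (c = g q.1 ∨ c ∈ dd.keys) := by
        intro dd
        by_cases hc : dd.contains (g q.1) = true <;> simp [hc, PySem.Dict.mem_keys_insert]
      simp only [hq, if_true, ih, hkeys, List.mem_cons]
      constructor
      · rintro ((h | h) | ⟨r, hr, hpr, hgr⟩)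
        · exact Or.inr ⟨q, Or.inl rfl, hq, h.symm⟩
        · exact Or.inl h
        · exact Or.inr ⟨r, Or.inr hr, hpr, hgr⟩
      · rintro (h | ⟨r, (rfl | hr), hpr, hgr⟩)
        · exact Or.inl (Or.inr h)
        · exact Or.inl (Or.inl hgr.symm)
        · exact Or.inr ⟨r, hr, hpr, hgr⟩
    · simp only [hq, Bool.false_eq_true, if_false, ih, List.mem_cons]
      constructor
      · rintro (h | ⟨r, hr, hpr, hgr⟩)
        · exact Or.inl h
        · exact Or.inr ⟨r, Or.inr hr, hpr, hgr⟩
      · rintro (h | ⟨r, (rfl | hr), hpr, hgr⟩)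
        · exact Or.inl h
        · exact absurd hpr (by simp [hq])
        · exact Or.inr ⟨r, hr, hpr, hgr⟩

-- summing full multiplicities over the distinct witnesses of p equals countP.
theorem pv_sum_count_distinct {α : Type} [DecidableEq α] (p : α → Bool) (D : List α)
    (hnd : D.Nodup) (hp : ∀ k ∈ D, p k) :
    ∀ (xs : List α), (∀ x ∈ xs, p x → x ∈ D) →
      ((D.map (fun k => xs.count k)).sum = xs.countP p) := by
  induction D with
  | nil =>
    intro xs hx
    simp only [List.map_nil, List.sum_nil]
    symm
    rw [List.countP_eq_zero]
    intro x hxm hpx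
    exact absurd (hx x hxm hpx) (List.not_mem_nil)
  | cons k t ih =>
    intro xs hx
    rcases List.nodup_cons.mp hnd with ⟨hk, ht⟩
    have hpt : ∀ k' ∈ t, p k' = true := fun k' h => hp k' (List.mem_cons_of_mem _ h)
    have hx' : ∀ x ∈ xs.filter (fun x => !decide (x = k)), p x → x ∈ t := by
      intro x hxm hpx
      rcases List.mem_filter.mp hxm with ⟨hxs, hne⟩
      rcases List.mem_cons.mp (hx x hxs hpx) with h | h
      · simp [h] at hne
      · exact h
    have ih' := ih ht hpt (xs.filter (fun x => !decide (x = k))) hx'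
    have hcnt : ∀ k' ∈ t, (xs.filter (fun x => !decide (x = k))).count k' = xs.count k' := by
      intro k' hk'
      have hne : ¬ (k' = k) := fun h => hk (h ▸ hk')
      rw [List.count_filter]
      simp [hne]
    rw [List.map_congr_left hcnt] at ih'
    simp only [List.map_cons, List.sum_cons, ih']
    rw [List.countP_eq_countP_filter_add xs p (fun x => decide (x = k)), List.countP_filter]
    have hck : (xs.filter (fun x => decide (x = k))).countP p = xs.count k := by
      clear hx hx' ih ih' hcnt
      induction xs with
      | nil => simp
      | cons y ys ihx =>
        by_cases hy : y = k
        · subst hy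
          simp [hp _ List.mem_cons_self, ihx]
        · simp [hy, ihx]
    rw [hck]

theorem pv_count_flatMap_replicate {α : Type} [DecidableEq α] (E : List α) (g : α → Nat)
    (hnd : E.Nodup) (c : α) :
    (E.flatMap (fun k => List.replicate (g k) k)).count c = if c ∈ E then g c else 0 := by
  induction E with
  | nil => simp
  | cons k t ih =>
    simp only [List.flatMap_cons, List.count_append, List.count_replicate]
    rcases List.nodup_cons.mp hnd with ⟨hk, ht⟩
    by_cases hc : c = k
    · subst hc
      simp [ih ht, hk]
    · simp only [List.mem_cons, ih ht]
      split_ifs <;> simp_all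

theorem pv_pairwise_flatMap_replicate (E : List Char) (g : Char → Nat)
    (h : E.Pairwise (· ≤ ·)) :
    (E.flatMap (fun k => List.replicate (g k) k)).Pairwise (· ≤ ·) := by
  induction E with
  | nil => simp
  | cons k t ih =>
    simp only [List.flatMap_cons]
    rcases List.pairwise_cons.mp h with ⟨hk, ht⟩
    apply List.pairwise_append.mpr
    refine ⟨List.pairwise_replicate.mpr (by simp), ih ht, ?_⟩
    intro a ha b hb
    rw [List.eq_of_mem_replicate ha]
    obtain ⟨k', hk', hb'⟩ := List.mem_flatMap.mp hb
    rw [List.eq_of_mem_replicate hb']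
    exact hk k' hk'

-- sorting a multiset = concatenating, over the sorted distinct values, each value
-- repeated its multiplicity.
theorem pv_sorted_eq_flatMap_replicate (L D : List Char) (hnd : D.Nodup)
    (hm : ∀ c, c ∈ D ↔ c ∈ L) :
    PySem.List.sorted L (fun x => x) false
      = (PySem.List.sorted D (fun x => x) false).flatMap
          (fun c => List.replicate (L.count c) c) := by
  have hndS : (PySem.List.sorted D (fun x => x) false).Nodup :=
    (PySem.List.sorted_perm D (fun x => x) false).nodup_iff.mpr hnd
  apply PySem.List.eq_of_perm_of_pairwise_le_of_injective (fun x => x) (fun a b h => h)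
  · refine (PySem.List.sorted_perm L (fun x => x) false).trans (List.perm_iff_count.mpr ?_)
    intro c
    rw [pv_count_flatMap_replicate _ _ hndS c]
    by_cases hc : c ∈ L
    · simp [PySem.List.mem_sorted, (hm c).mpr hc]
    · simp [PySem.List.mem_sorted, List.count_eq_zero_of_not_mem hc]
  · exact PySem.List.sorted_pairwise L (fun x => x)
  · exact pv_pairwise_flatMap_replicate _ _ (PySem.List.sorted_pairwise D (fun x => x))

-- ===== VERDICT (by name: the statement is the Claim_ definition above) =====
theorem smallest_lexicographic_string_spec : Claim_equal_smallest_lexicographic_string := by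
  intro S N A M hDom hPre
  unfold Spec_smallest_lexicographic_string
  unfold smallest_lexicographic_string smallest_lexicographic_string_alt
  by_cases hN : PySem.Int.mod N 5 ≠ 0
  · simp only [if_pos hN]
  · simp only [if_neg hN]
    set btc : PySem.Dict String Char := pvBinToChar A M with hbtc
    set p : String → Bool := fun s => btc.contains s with hp
    set g : String → Char := fun s => btc.getD s 'a' with hg
    set chunks : List String :=
      (PySem.List.pyRange 0 N 5).map (fun i => PySem.Str.slice S (some i) (some (i + 5))) with hchunks
    set L : List Char := (chunks.filter p).map g with hL
    -- B's letters loop is L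
    have hB : (PySem.List.pyRange 0 N 5).foldl
        (fun acc i =>
          if btc.contains (PySem.Str.slice S (some i) (some (i + 5))) then
            acc ++ [btc.getD (PySem.Str.slice S (some i) (some (i + 5))) 'a']
          else acc) ([] : List Char) = L := by
      have e1 := (List.foldl_map (f := fun i => PySem.Str.slice S (some i) (some (i + 5)))
        (g := fun (acc : List Char) s => if p s then acc ++ [g s] else acc)
        (l := PySem.List.pyRange 0 N 5) (init := ([] : List Char))).symm
      exact e1.trans ((PySem.List.foldl_append_if (l := chunks) (acc := ([] : List Char)) p g).trans (by simp [hL]))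
    -- A's pattern_count is counter chunks
    have hA1 : (PySem.List.pyRange 0 N 5).foldl
        (fun d i =>
          let bin_str := PySem.Str.slice S (some i) (some (i + 5))
          if d.contains bin_str then d.insert bin_str (d.getD bin_str 0 + 1)
          else d.insert bin_str 1) PySem.Dict.empty = PySem.Dict.counter chunks := by
      have e1 := (List.foldl_map (f := fun i => PySem.Str.slice S (some i) (some (i + 5)))
        (g := fun (d : PySem.Dict String Int) x =>
          if d.contains x then d.insert x (d.getD x 0 + 1) else d.insert x 1)
        (l := PySem.List.pyRange 0 N 5) (init := PySem.Dict.empty)).symm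
      have e2 : chunks.foldl
            (fun (d : PySem.Dict String Int) x =>
              if d.contains x then d.insert x (d.getD x 0 + 1) else d.insert x 1)
            PySem.Dict.empty
          = chunks.foldl (fun (d : PySem.Dict String Int) x => d.insert x (d.getD x 0 + 1))
            PySem.Dict.empty := by
        apply PySem.List.foldl_congr_mem
        intro d x _
        by_cases hc : d.contains x = true
        · simp [hc]
        · simp only [Bool.not_eq_true] at hc
          simp [hc, PySem.Dict.getD_of_not_contains (d := d) (k := x) (d0 := (0:Int)) hc]
      exact e1.trans (e2.trans (PySem.Dict.foldl_insert_getD_add_one_eq_counter chunks))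
    rw [hA1, hB]
    set cc : PySem.Dict Char Int :=
      (PySem.Dict.counter chunks).items.foldl
        (fun d q =>
          if p q.1 then
            if d.contains (g q.1) then d.insert (g q.1) (d.getD (g q.1) 0 + q.2)
            else d.insert (g q.1) q.2
          else d) PySem.Dict.empty with hcc
    -- getD of char_count is the multiplicity in L
    have hgetD : ∀ c : Char, cc.getD c 0 = (L.count c : Int) := by
      intro c
      rw [hcc, pv_charfold_getD, PySem.Dict.items_counter, List.filter_map, List.map_map]
      have hE :
          ((PySem.Set.ofList chunks).filter
              ((fun q : String × Int => p q.1 && (g q.1 == c)) ∘ fun k => (k, (chunks.count k : Int)))) =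
            ((PySem.Set.ofList chunks).filter (fun k => p k && (g k == c))) := rfl
      rw [hE]
      set E := (PySem.Set.ofList chunks).filter (fun k => p k && (g k == c)) with hEdef
      have hmapped : ((·.2) ∘ fun k => (k, (chunks.count k : Int))) = fun k => (chunks.count k : Int) := rfl
      rw [hmapped]
      have hsum : (E.map (fun k => (chunks.count k : Int))).sum
          = ((E.map (fun k => chunks.count k)).sum : Int) := by
        rw [Nat.cast_list_sum, List.map_map]
        rfl
      rw [hsum]
      have hnd : E.Nodup := (PySem.Set.nodup_ofList chunks).filter _
      have hpE : ∀ k ∈ E, (fun k => p k && (g k == c)) k := fun k hk => (List.mem_filter.mp hk).2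
      have hcover : ∀ x ∈ chunks, (fun k => p k && (g k == c)) x → x ∈ E := by
        intro x hx hpx
        exact List.mem_filter.mpr ⟨(PySem.Set.mem_ofList _ _).mpr hx, hpx⟩
      rw [pv_sum_count_distinct _ E hnd hpE chunks hcover, ← pv_count_filter_map p g, ← hL]
      simp [PySem.Dict.getD_empty]
    -- keys of char_count: the distinct chars of L
    have hkeysnd : cc.keys.Nodup := by
      rw [hcc]
      apply pv_charfold_keys_nodup
      simp [PySem.Dict.keys_empty]
    have hkeysmem : ∀ c : Char, c ∈ cc.keys ↔ c ∈ L := by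
      intro c
      rw [hcc, pv_charfold_keys_mem]
      simp only [PySem.Dict.keys_empty, List.not_mem_nil, false_or]
      rw [hL]
      constructor
      · rintro ⟨q, hq, hpq, hgq⟩
        rw [PySem.Dict.items_counter] at hq
        obtain ⟨k, hk, rfl⟩ := List.mem_map.mp hq
        exact List.mem_map.mpr ⟨k, List.mem_filter.mpr ⟨(PySem.Set.mem_ofList _ _).mp hk, hpq⟩, hgq⟩
      · intro hcl
        obtain ⟨k, hk, hgk⟩ := List.mem_map.mp hcl
        rcases List.mem_filter.mp hk with ⟨hkc, hpk⟩
        refine ⟨(k, (chunks.count k : Int)), ?_, hpk, hgk⟩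
        rw [PySem.Dict.items_counter]
        exact List.mem_map.mpr ⟨k, (PySem.Set.mem_ofList _ _).mpr hkc, rfl⟩
    -- A's result loop
    rw [PySem.List.foldl_append_singleton_eq_map]
    simp only [List.nil_append]
    have hblocks : (fun c => List.replicate (cc.getD c 0).toNat c)
        = fun c => List.replicate (L.count c) c := by
      funext c
      rw [hgetD c, Int.toNat_natCast]
    rw [hblocks]
    -- emptiness of the two sides coincides
    have hempty : (PySem.List.sorted cc.keys (fun x => x) false).map
          (fun c => List.replicate (L.count c) c) = [] ↔
        PySem.List.sorted L (fun x => x) false = [] := by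
      rw [List.map_eq_nil_iff, PySem.List.sorted_eq_nil_iff, PySem.List.sorted_eq_nil_iff]
      constructor
      · intro h
        rw [List.eq_nil_iff_forall_not_mem]
        intro c hcl
        exact absurd ((hkeysmem c).mpr hcl) (by simp [h])
      · intro h
        rw [List.eq_nil_iff_forall_not_mem]
        intro c hck
        exact absurd ((hkeysmem c).mp hck) (by simp [h])
    by_cases hres : (PySem.List.sorted cc.keys (fun x => x) false).map
        (fun c => List.replicate (L.count c) c) = []
    · rw [if_pos hres, if_pos (hempty.mp hres)]
    · rw [if_neg hres, if_neg (fun h => hres (hempty.mpr h))]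
      congr 1
      rw [← List.flatMap_def]
      exact (pv_sorted_eq_flatMap_replicate L cc.keys hkeysnd hkeysmem).symm
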